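-- pv_equiv track=rewrite | github.com/thinkingInWorldByNull/mini-scm-interpreter | src/syntax_parser/tokenizer.py | _next_candidate_token
-- ===== SOURCE A (Python) =====
-- from typing import Tuple, Callable
--
-- TOKEN = str | None
--
-- NEXT_TOKEN_INDEX = int
--
-- _WHITESPACE = set(" \t\n\r")
--
-- _SINGLE_CHAR_TOKENS = set("()'")
--
-- _TOKEN_END = _WHITESPACE | _SINGLE_CHAR_TOKENS
--
-- _MAX_TOKEN_LENGTH = 50
--
-- _COMMENT = ";"
--
-- _BOOLEAN_PREFIX = "#"
--
-- def _next_candidate_token(line, k) -> Tuple[TOKEN, NEXT_TOKEN_INDEX]: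
--     while k < len(line):
--         ch = line[k]
--
--         if _be_comment_line(ch):
--             return None, len(line)
--
--         elif _be_whit_space_line(ch):
--             k += 1
--
--         elif _be_single_char_token(ch):
--             return ch, k + 1
--
--         elif _be_boolean_prefix(ch):  # 布尔值 #t or #f
--             return line[k:k + 2], min(k + 2, len(line))
--
--         else:
--             j = _query_token_next_pos(k, line)
--             _max_token_length_warning(line[k:j], min(j, len(line)) - k)
--
--             return line[k:j], min(j, len(line))
--
--     return None, len(line)
--
-- def _be_comment_line(ch: str) -> bool:
--     return _COMMENT == ch
--
-- def _be_whit_space_line(ch: str) -> bool: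
--     return ch in _WHITESPACE
--
-- def _be_single_char_token(ch: str) -> bool:
--     return ch in _SINGLE_CHAR_TOKENS
--
-- def _be_boolean_prefix(ch: str) -> bool:
--     return _BOOLEAN_PREFIX == ch
--
-- def _be_not_token_end(ch: str) -> bool:
--     return ch not in _TOKEN_END
--
-- def _query_token_next_pos(cur_pos, line):
--     token_end_pos = cur_pos
--
--     while token_end_pos < len(line) and _be_not_token_end(line[token_end_pos]):
--         token_end_pos += 1
--
--     return token_end_pos
--
-- def _max_token_length_warning(token, length):
--     if length > _MAX_TOKEN_LENGTH:
--         import warnings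
--         warnings.warn("Token {} has exceeded the maximum token length {}".format(token, _MAX_TOKEN_LENGTH))
-- ===== SOURCE B (Python) =====
-- _WS = " \t\n\r"
--
--
-- def _comment_tok(line, i, n):
--     return None, n
--
--
-- def _single_tok(line, i, n):
--     return line[i], i + 1
--
--
-- def _bool_tok(line, i, n):
--     return line[i:i + 2], min(i + 2, n)
--
--
-- def _word_tok(line, i, n):
--     buf = []
--     while i < n and line[i] not in " \t\n\r()'":
--         buf.append(line[i])
--         i += 1
--     return ''.join(buf), i
--
--
-- _DISPATCH = {';': _comment_tok, '(': _single_tok, ')': _single_tok,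
--              "'": _single_tok, '#': _bool_tok}
--
--
-- def _next_candidate_token(line, k):
--     n = len(line)
--     while k < n and line[k] in _WS:
--         k += 1
--     if k >= n:
--         return None, n
--     return _DISPATCH.get(line[k], _word_tok)(line, k, n)
-- ===== Notes on version B (the rewrite author's own statement) =====
-- stated objective: idiomatic
-- what changed: A's single restarting while-loop with an if/elif predicate chain and a slice-producing inner index loop is replaced by a table-driven scanner: one whitespace-skip pass, then a dispatch dictionary mapping the classifying character to a handler function (comment/single/boolean-prefix), with a default handler that builds the word token character by character into a buffer and joins it instead of computing an end index and slicing.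
-- outside the precondition, e.g. on _next_candidate_token('ab', -1): A returns ('b', 2), B returns ('bab', 2)
import Mathlib
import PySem

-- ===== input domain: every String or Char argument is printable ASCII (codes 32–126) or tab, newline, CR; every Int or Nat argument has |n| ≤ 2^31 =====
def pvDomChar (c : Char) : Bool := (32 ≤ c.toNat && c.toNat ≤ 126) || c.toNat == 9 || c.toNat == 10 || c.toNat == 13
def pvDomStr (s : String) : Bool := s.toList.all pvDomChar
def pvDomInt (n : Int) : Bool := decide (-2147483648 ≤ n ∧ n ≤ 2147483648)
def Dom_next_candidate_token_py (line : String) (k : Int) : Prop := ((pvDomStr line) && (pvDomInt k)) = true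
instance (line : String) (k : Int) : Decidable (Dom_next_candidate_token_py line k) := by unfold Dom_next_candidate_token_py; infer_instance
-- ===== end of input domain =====

-- B replaces A's restarting while-loop with its if/elif predicate chain by a
-- table-driven scanner: a whitespace-skip pass, then a dispatch dictionary from the
-- classifying character to a handler, the default handler building the word token
-- into a buffer instead of slicing; objective: idiomatic, same cost.  A's >50-length
-- warnings.warn is a side effect only and B drops it; equivalence is
-- about the return value.

-- ===== PORT A =====
def pvWsA : List Char := [' ', '\t', '\n', '\r']

def pvSingleA : List Char := ['(', ')', '\'']

-- _query_token_next_pos: advance while the current char is NOT a token end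
def pvQueryA (cs : List Char) (pos : Int) : Int :=
  if _h : pos < (cs.length : Int) then
    match PySem.List.pyGet? cs pos with
    | some c =>
        if ¬ (c ∈ pvWsA ∨ c ∈ pvSingleA) then pvQueryA cs (pos + 1) else pos
    | none => pos   -- Python raises IndexError here (pos < -len); outside Pre_
  else pos
termination_by ((cs.length : Int) - pos).toNat
decreasing_by omega

def pvLoopA (cs : List Char) (k : Int) : Option String × Int :=
  let n : Int := cs.length
  if _h : k < n then
    match PySem.List.pyGet? cs k with
    | none => (none, n)   -- Python raises IndexError here (k < -len); outside Pre_
    | some ch =>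
      if ch = ';' then (none, n)
      else if ch ∈ pvWsA then pvLoopA cs (k + 1)
      else if ch ∈ pvSingleA then (some ch.toString, k + 1)
      else if ch = '#' then
        (some (String.ofList (PySem.List.slice cs (some k) (some (k + 2)))), min (k + 2) n)
      else
        let j := pvQueryA cs k
        (some (String.ofList (PySem.List.slice cs (some k) (some j))), min j n)
  else (none, n)
termination_by ((cs.length : Int) - k).toNat
decreasing_by omega

def next_candidate_token_py (line : String) (k : Int) : Option String × Int :=
  pvLoopA line.toList k

-- ===== PORT B =====
def pvWsB : List Char := [' ', '\t', '\n', '\r']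

def pvEndB : List Char := [' ', '\t', '\n', '\r', '(', ')', '\'']

def pvCommentTok (_cs : List Char) (_i n : Int) : Option String × Int := (none, n)

def pvSingleTok (cs : List Char) (i _n : Int) : Option String × Int :=
  match PySem.List.pyGet? cs i with
  | some c => (some c.toString, i + 1)
  | none => (none, i + 1)   -- unreachable: the caller found a char at i

def pvBoolTok (cs : List Char) (i n : Int) : Option String × Int :=
  (some (String.ofList (PySem.List.slice cs (some i) (some (i + 2)))), min (i + 2) n)

-- default handler: build the word token char by char into buf, join at the end
def pvWordLoop (cs : List Char) (i : Int) (buf : List Char) : List Char × Int :=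
  if _h : i < (cs.length : Int) then
    match PySem.List.pyGet? cs i with
    | some c => if ¬ (pvEndB.contains c = true) then pvWordLoop cs (i + 1) (buf ++ [c]) else (buf, i)
    | none => (buf, i)
  else (buf, i)
termination_by ((cs.length : Int) - i).toNat
decreasing_by omega

def pvWordTok (cs : List Char) (i _n : Int) : Option String × Int :=
  let r := pvWordLoop cs i []
  (some (String.ofList r.1), r.2)

def pvDispatch : PySem.Dict Char (List Char → Int → Int → Option String × Int) :=
  PySem.Dict.ofList [(';', pvCommentTok), ('(', pvSingleTok), (')', pvSingleTok),
                     ('\'', pvSingleTok), ('#', pvBoolTok)]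

def pvSkipB (cs : List Char) (i : Int) : Int :=
  if _h : i < (cs.length : Int) then
    match PySem.List.pyGet? cs i with
    | some c => if pvWsB.contains c then pvSkipB cs (i + 1) else i
    | none => i
  else i
termination_by ((cs.length : Int) - i).toNat
decreasing_by omega

def next_candidate_token_py_alt (line : String) (k : Int) : Option String × Int :=
  let cs := line.toList
  let n : Int := cs.length
  let i := pvSkipB cs k
  if i ≥ n then (none, n)
  else
    match PySem.List.pyGet? cs i with
    | some c => (PySem.Dict.getD pvDispatch c pvWordTok) cs i n
    | none => (none, n)   -- unreachable for 0 ≤ i < n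

-- ===== PRECONDITION & SPEC =====
-- Pre_ restricts to the tokenizer's natural domain of nonneg start indices: for
-- k < -len A raises IndexError, and for -len ≤ k < 0 A's value comes from Python's
-- negative-index wraparound (it scans from the END of the line), outside the
-- scanner's natural domain.
def Pre_next_candidate_token_py (line : String) (k : Int) : Prop := 0 ≤ k
instance (line : String) (k : Int) : Decidable (Pre_next_candidate_token_py line k) := by unfold Pre_next_candidate_token_py; infer_instance

def pvWitness_next_candidate_token_py : String × Int := ("( let", 1)

def Spec_next_candidate_token_py (line : String) (k : Int) (out : Option String × Int) : Prop := out = next_candidate_token_py_alt line k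
instance (line : String) (k : Int) (out : Option String × Int) : Decidable (Spec_next_candidate_token_py line k out) := by unfold Spec_next_candidate_token_py; infer_instance

-- ===== CLAIM (what is proved, stated in full; the proofs are below) =====
def Claim_equal_next_candidate_token_py : Prop := ∀ (line : String) (k : Int), Dom_next_candidate_token_py line k → Pre_next_candidate_token_py line k → Spec_next_candidate_token_py line k (next_candidate_token_py line k)

-- ===== LEMMAS AND PROOFS =====

theorem pvGet_some {cs : List Char} {i : Int} (h1 : 0 ≤ i)
    (h2 : i < (cs.length : Int)) : ∃ c, PySem.List.pyGet? cs i = some c := by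
  rcases hc : PySem.List.pyGet? cs i with _ | c
  · rw [PySem.List.pyGet?_eq_none_iff] at hc
    exact absurd ⟨by omega, h2⟩ hc
  · exact ⟨c, rfl⟩

theorem pvEnd_iff (c : Char) : pvEndB.contains c = true ↔ (c ∈ pvWsA ∨ c ∈ pvSingleA) := by
  simp only [pvEndB, pvWsA, pvSingleA, List.contains_eq_mem, List.mem_cons,
    List.not_mem_nil, or_false, decide_eq_true_eq]
  tauto

-- step/stop unfolding lemmas for the three loops
theorem pvQueryA_ge {cs : List Char} {i : Int} (h : ¬ i < (cs.length : Int)) :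
    pvQueryA cs i = i := by rw [pvQueryA, dif_neg h]

theorem pvQueryA_step {cs : List Char} {i : Int} {c : Char} (h : i < (cs.length : Int))
    (hc : PySem.List.pyGet? cs i = some c) (hend : ¬ (c ∈ pvWsA ∨ c ∈ pvSingleA)) :
    pvQueryA cs i = pvQueryA cs (i + 1) := by
  rw [pvQueryA, dif_pos h, hc]
  show (if ¬ (c ∈ pvWsA ∨ c ∈ pvSingleA) then pvQueryA cs (i + 1) else i) = _
  rw [if_pos hend]

theorem pvQueryA_stop {cs : List Char} {i : Int} {c : Char} (h : i < (cs.length : Int))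
    (hc : PySem.List.pyGet? cs i = some c) (hend : c ∈ pvWsA ∨ c ∈ pvSingleA) :
    pvQueryA cs i = i := by
  rw [pvQueryA, dif_pos h, hc]
  show (if ¬ (c ∈ pvWsA ∨ c ∈ pvSingleA) then pvQueryA cs (i + 1) else i) = _
  rw [if_neg (not_not_intro hend)]

theorem pvSkipB_ge {cs : List Char} {i : Int} (h : ¬ i < (cs.length : Int)) :
    pvSkipB cs i = i := by rw [pvSkipB, dif_neg h]

theorem pvSkipB_step {cs : List Char} {i : Int} {c : Char} (h : i < (cs.length : Int))
    (hc : PySem.List.pyGet? cs i = some c) (hws : pvWsB.contains c = true) :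
    pvSkipB cs i = pvSkipB cs (i + 1) := by
  rw [pvSkipB, dif_pos h, hc]
  show (if pvWsB.contains c = true then pvSkipB cs (i + 1) else i) = _
  rw [if_pos hws]

theorem pvSkipB_stop {cs : List Char} {i : Int} {c : Char} (h : i < (cs.length : Int))
    (hc : PySem.List.pyGet? cs i = some c) (hws : ¬ pvWsB.contains c = true) :
    pvSkipB cs i = i := by
  rw [pvSkipB, dif_pos h, hc]
  show (if pvWsB.contains c = true then pvSkipB cs (i + 1) else i) = _
  rw [if_neg hws]

theorem pvWordLoop_ge {cs : List Char} {i : Int} (buf : List Char)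
    (h : ¬ i < (cs.length : Int)) : pvWordLoop cs i buf = (buf, i) := by
  rw [pvWordLoop, dif_neg h]

theorem pvWordLoop_step {cs : List Char} {i : Int} {c : Char} (buf : List Char)
    (h : i < (cs.length : Int)) (hc : PySem.List.pyGet? cs i = some c)
    (hend : ¬ pvEndB.contains c = true) :
    pvWordLoop cs i buf = pvWordLoop cs (i + 1) (buf ++ [c]) := by
  rw [pvWordLoop, dif_pos h, hc]
  show (if ¬ (pvEndB.contains c = true) then pvWordLoop cs (i + 1) (buf ++ [c]) else (buf, i)) = _
  rw [if_pos hend]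

theorem pvWordLoop_stop {cs : List Char} {i : Int} {c : Char} (buf : List Char)
    (h : i < (cs.length : Int)) (hc : PySem.List.pyGet? cs i = some c)
    (hend : pvEndB.contains c = true) :
    pvWordLoop cs i buf = (buf, i) := by
  rw [pvWordLoop, dif_pos h, hc]
  show (if ¬ (pvEndB.contains c = true) then pvWordLoop cs (i + 1) (buf ++ [c]) else (buf, i)) = _
  rw [if_neg (not_not_intro hend)]

theorem pvQueryA_bounds (cs : List Char) (pos : Int) (h0 : 0 ≤ pos)
    (h : pos ≤ (cs.length : Int)) :
    pos ≤ pvQueryA cs pos ∧ pvQueryA cs pos ≤ (cs.length : Int) := by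
  by_cases hlt : pos < (cs.length : Int)
  · obtain ⟨c, hc⟩ := pvGet_some h0 hlt
    by_cases hend : c ∈ pvWsA ∨ c ∈ pvSingleA
    · rw [pvQueryA_stop hlt hc hend]; omega
    · rw [pvQueryA_step hlt hc hend]
      have := pvQueryA_bounds cs (pos + 1) (by omega) (by omega)
      omega
  · rw [pvQueryA_ge hlt]; omega
termination_by ((cs.length : Int) - pos).toNat
decreasing_by omega

-- one step of the slice in the word branch
theorem pvSlice_cons {cs : List Char} {i j : Int} {c : Char} (h0 : 0 ≤ i) (hij : i < j)
    (hc : PySem.List.pyGet? cs i = some c) :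
    PySem.List.slice cs (some i) (some j) = c :: PySem.List.slice cs (some (i + 1)) (some j) := by
  have hin : i < (cs.length : Int) := by
    by_contra hge
    have hnone : PySem.List.pyGet? cs i = none := by
      rw [PySem.List.pyGet?_eq_none_iff]
      exact fun hcon => hge hcon.2
    rw [hnone] at hc
    cases hc
  rw [PySem.List.slice_toNat _ h0 (by omega), PySem.List.slice_toNat _ (by omega) (by omega)]
  have hi : i.toNat < cs.length := by omega
  have hcel : cs[i.toNat] = c := by
    have h1 : PySem.List.pyGet? cs ((i.toNat : Nat) : Int) = cs[(i.toNat : Nat)]? :=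
      PySem.List.pyGet?_natCast cs i.toNat
    rw [show ((i.toNat : Nat) : Int) = i by omega, hc, List.getElem?_eq_getElem hi] at h1
    exact (Option.some_inj.mp h1).symm
  rw [List.drop_eq_getElem_cons hi, hcel,
    show j.toNat - i.toNat = (j.toNat - (i.toNat + 1)) + 1 by omega, List.take_succ_cons,
    show (i + 1).toNat = i.toNat + 1 by omega]

theorem pvSlice_nil (cs : List Char) (i : Int) (h0 : 0 ≤ i) :
    PySem.List.slice cs (some i) (some i) = [] := by
  rw [PySem.List.slice_toNat _ h0 h0]
  simp

theorem pvWordLoop_eq (cs : List Char) (i : Int) (buf : List Char) (h0 : 0 ≤ i)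
    (hle : i ≤ (cs.length : Int)) :
    pvWordLoop cs i buf
      = (buf ++ PySem.List.slice cs (some i) (some (pvQueryA cs i)), pvQueryA cs i) := by
  by_cases hlt : i < (cs.length : Int)
  · obtain ⟨c, hc⟩ := pvGet_some h0 hlt
    by_cases hend : c ∈ pvWsA ∨ c ∈ pvSingleA
    · rw [pvWordLoop_stop buf hlt hc ((pvEnd_iff c).mpr hend), pvQueryA_stop hlt hc hend,
        pvSlice_nil cs i h0, List.append_nil]
    · rw [pvWordLoop_step buf hlt hc (by rw [pvEnd_iff]; exact hend),
        pvQueryA_step hlt hc hend,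
        pvWordLoop_eq cs (i + 1) (buf ++ [c]) (by omega) (by omega)]
      have hq := pvQueryA_bounds cs (i + 1) (by omega) (by omega)
      rw [pvSlice_cons h0 (by omega) hc]
      simp
  · rw [pvWordLoop_ge buf hlt, pvQueryA_ge hlt, pvSlice_nil cs i h0, List.append_nil]
termination_by ((cs.length : Int) - i).toNat
decreasing_by omega

theorem pvDispatch_default {c : Char} (hsemi : ¬ c = ';') (h1 : ¬ c = '(') (h2 : ¬ c = ')')
    (h3 : ¬ c = '\'') (hhash : ¬ c = '#') :
    PySem.Dict.getD pvDispatch c pvWordTok = pvWordTok := by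
  rw [show pvDispatch = PySem.Dict.mk [(';', pvCommentTok), ('(', pvSingleTok),
    (')', pvSingleTok), ('\'', pvSingleTok), ('#', pvBoolTok)] from rfl]
  simp [PySem.Dict.getD, PySem.Dict.get?,
    Ne.symm hsemi, Ne.symm h1, Ne.symm h2, Ne.symm h3, Ne.symm hhash]

theorem pvMain (cs : List Char) (k : Int) (hk : 0 ≤ k) :
    pvLoopA cs k
      = (let n : Int := cs.length
         let i := pvSkipB cs k
         if i ≥ n then (none, n)
         else
           match PySem.List.pyGet? cs i with
           | some c => (PySem.Dict.getD pvDispatch c pvWordTok) cs i n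
           | none => (none, n)) := by
  by_cases hlt : k < (cs.length : Int)
  · obtain ⟨c, hc⟩ := pvGet_some hk hlt
    rw [pvLoopA, dif_pos hlt]
    simp only [hc]
    by_cases hws : c ∈ pvWsA
    · -- whitespace: both sides advance to k+1
      have hnc : ¬ (c = ';') := by fin_cases hws <;> decide
      have hcn : pvWsB.contains c = true := by
        simpa [pvWsB, pvWsA, List.contains_eq_mem] using hws
      rw [if_neg hnc, if_pos hws]
      simp only [pvSkipB_step hlt hc hcn]
      exact pvMain cs (k + 1) (by omega)
    · -- non-whitespace: the skip pass stops here
      have hcn : ¬ pvWsB.contains c = true := by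
        simpa [pvWsB, pvWsA, List.contains_eq_mem] using hws
      simp only [pvSkipB_stop hlt hc hcn, if_neg (by omega : ¬ k ≥ (cs.length : Int)), hc]
      by_cases hsemi : c = ';'
      · subst hsemi
        rw [if_pos rfl]
        rfl
      · rw [if_neg hsemi, if_neg hws]
        by_cases hsc : c ∈ pvSingleA
        · rw [if_pos hsc]
          have hdisp : PySem.Dict.getD pvDispatch c pvWordTok = pvSingleTok := by
            fin_cases hsc <;> rfl
          rw [hdisp]
          simp only [pvSingleTok, hc]
        · rw [if_neg hsc]
          by_cases hhash : c = '#'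
          · subst hhash
            rw [if_pos rfl]
            rfl
          · rw [if_neg hhash]
            have h1 : ¬ (c = '(') := fun h => hsc (by rw [h]; exact List.mem_cons_self)
            have h2 : ¬ (c = ')') := fun h => hsc (by rw [h]; decide)
            have h3 : ¬ (c = '\'') := fun h => hsc (by rw [h]; decide)
            rw [pvDispatch_default hsemi h1 h2 h3 hhash]
            show _ = pvWordTok cs k (cs.length : Int)
            rw [pvWordTok]
            rw [pvWordLoop_eq cs k [] hk (by omega)]
            have hq := pvQueryA_bounds cs k hk (by omega)
            simp only [List.nil_append]
            rw [min_eq_left hq.2]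
  · rw [pvLoopA, dif_neg hlt]
    simp only [pvSkipB_ge hlt, if_pos (by omega : k ≥ (cs.length : Int))]
termination_by ((cs.length : Int) - k).toNat
decreasing_by omega

-- ===== VERDICT (by name: the statement is the Claim_ definition above) =====
theorem next_candidate_token_py_spec : Claim_equal_next_candidate_token_py := by
  intro line k _hd hpre
  unfold Spec_next_candidate_token_py next_candidate_token_py next_candidate_token_py_alt
  exact pvMain line.toList k hpre
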